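-- pv_equiv track=rewrite | github.com/CodeRishiX/Nex-Bank | app.py | password_requirements
-- ===== SOURCE A (Python) =====
-- def password_requirements(password):
--     requirements = [
--         (len(password) >= 8, "At least 8 characters"),
--         (any(char.isdigit() for char in password), "At least one number"),
--         (any(char.islower() for char in password), "At least one lowercase letter"),
--         (any(char.isupper() for char in password), "At least one uppercase letter"),
--         (any(char in '@#$%^&+=!' for char in password), "At least one special character (@#$%^&+=!)")
--     ]
--     met_count = sum(1 for met, _ in requirements if met)
--     total_requirements = len(requirements)
--     unmet_requirements = [text for met, text in requirements if not met]
--     progress_html = f"""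
--     <div class="password-strength-container">
--         <div class="password-strength-header">
--             <span>Password Strength</span>
--             <span>{met_count}/{total_requirements}</span>
--         </div>
--         <div class="password-strength-meter">
--             <div class="password-strength-progress" style="width: {met_count / total_requirements * 100}%"></div>
--         </div>
--     </div>
--     """
--     return progress_html, unmet_requirements
-- ===== SOURCE B (Python) =====
-- def password_requirements(password):
--     # one pass over the characters, four flags
--     has_digit = has_lower = has_upper = has_special = False
--     for ch in password:
--         if ch.isdigit():
--             has_digit = True
--         if ch.islower():
--             has_lower = True
--         if ch.isupper():
--             has_upper = True
--         if ch in '@#$%^&+=!':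
--             has_special = True
--     flags = [
--         (len(password) >= 8, "At least 8 characters"),
--         (has_digit, "At least one number"),
--         (has_lower, "At least one lowercase letter"),
--         (has_upper, "At least one uppercase letter"),
--         (has_special, "At least one special character (@#$%^&+=!)"),
--     ]
--     met_count = sum(1 for met, _ in flags if met)
--     unmet_requirements = [text for met, text in flags if not met]
--     progress_html = f"""
--     <div class="password-strength-container">
--         <div class="password-strength-header">
--             <span>Password Strength</span>
--             <span>{met_count}/{len(flags)}</span>
--         </div>
--         <div class="password-strength-meter">
--             <div class="password-strength-progress" style="width: {met_count / len(flags) * 100}%"></div>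
--         </div>
--     </div>
--     """
--     return progress_html, unmet_requirements
-- ===== Notes on version B (the rewrite author's own statement) =====
-- stated objective: simpler
-- what changed: Replaces the five separate any()-scans over the password (one per requirement) with a single explicit pass maintaining four boolean flags, then assembles the same requirements list, counts and HTML from the flags.
import Mathlib
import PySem

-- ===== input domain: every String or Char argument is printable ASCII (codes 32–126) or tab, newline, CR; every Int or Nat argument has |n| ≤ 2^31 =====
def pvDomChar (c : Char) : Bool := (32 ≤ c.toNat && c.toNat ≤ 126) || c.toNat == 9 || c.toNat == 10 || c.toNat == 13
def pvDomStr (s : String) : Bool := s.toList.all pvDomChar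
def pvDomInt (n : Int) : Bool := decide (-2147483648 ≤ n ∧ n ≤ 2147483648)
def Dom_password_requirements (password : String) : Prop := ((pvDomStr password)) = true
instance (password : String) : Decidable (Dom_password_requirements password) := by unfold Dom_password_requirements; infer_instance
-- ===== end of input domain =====

-- B rewrites A's five per-requirement scans of the password as one explicit pass updating
-- four booleans; the requirements list, counts and HTML are assembled from those flags (objective: simpler).

-- shared by both ports: both Pythons build the identical f-string; the float
-- met_count / 5 * 100 always repr's as "<met*20>.0" (met ∈ 0..5), so this hand-port is exact there
def pvHtml (met : Int) : String :=
  "\n    <div class=\"password-strength-container\">\n        <div class=\"password-strength-header\">\n            <span>Password Strength</span>\n            <span>" ++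
  PySem.Int.toStr met ++ "/5</span>\n        </div>\n        <div class=\"password-strength-meter\">\n            <div class=\"password-strength-progress\" style=\"width: " ++
  PySem.Int.toStr (met * 20) ++ ".0%\"></div>\n        </div>\n    </div>\n    "

def pvSpecial : List Char := "@#$%^&+=!".toList

-- ===== PORT A =====
def password_requirements (password : String) : String × List String :=
  let cs := password.toList
  let requirements : List (Bool × String) := [
    (decide ((PySem.Str.len password : Int) ≥ 8), "At least 8 characters"),
    (cs.any (fun c => PySem.Chars.isdigit c), "At least one number"),
    (cs.any (fun c => PySem.Chars.islower c), "At least one lowercase letter"),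
    (cs.any (fun c => PySem.Chars.isupper c), "At least one uppercase letter"),
    (cs.any (fun c => pvSpecial.contains c), "At least one special character (@#$%^&+=!)")]
  let met_count : Int := requirements.foldl (fun acc mt => if mt.1 then acc + 1 else acc) 0
  let unmet_requirements := requirements.filterMap (fun mt => if mt.1 then none else some mt.2)
  (pvHtml met_count, unmet_requirements)

-- ===== PORT B =====
def password_requirements_alt (password : String) : String × List String :=
  let st := password.toList.foldl
    (fun (st : Bool × Bool × Bool × Bool) c =>
      (st.1 || PySem.Chars.isdigit c,
       st.2.1 || PySem.Chars.islower c,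
       st.2.2.1 || PySem.Chars.isupper c,
       st.2.2.2 || pvSpecial.contains c))
    (false, false, false, false)
  let flags : List (Bool × String) := [
    (decide ((PySem.Str.len password : Int) ≥ 8), "At least 8 characters"),
    (st.1, "At least one number"),
    (st.2.1, "At least one lowercase letter"),
    (st.2.2.1, "At least one uppercase letter"),
    (st.2.2.2, "At least one special character (@#$%^&+=!)")]
  let met_count : Int := flags.foldl (fun acc mt => if mt.1 then acc + 1 else acc) 0
  let unmet_requirements := flags.filterMap (fun mt => if mt.1 then none else some mt.2)
  (pvHtml met_count, unmet_requirements)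

-- ===== PRECONDITION & SPEC =====
def Spec_password_requirements (password : String) (out : String × List String) : Prop := out = password_requirements_alt password
instance (password : String) (out : String × List String) : Decidable (Spec_password_requirements password out) := by unfold Spec_password_requirements; infer_instance

-- ===== CLAIM (what is proved, stated in full; the proofs are below) =====
def Claim_equal_password_requirements : Prop := ∀ (password : String), Dom_password_requirements password → Spec_password_requirements password (password_requirements password)

-- ===== LEMMAS AND PROOFS =====
theorem pvFold4 (cs : List Char) (d l u s : Bool) :
    cs.foldl
      (fun (st : Bool × Bool × Bool × Bool) c =>
        (st.1 || PySem.Chars.isdigit c,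
         st.2.1 || PySem.Chars.islower c,
         st.2.2.1 || PySem.Chars.isupper c,
         st.2.2.2 || pvSpecial.contains c))
      (d, l, u, s)
    = (d || cs.any (fun c => PySem.Chars.isdigit c),
       l || cs.any (fun c => PySem.Chars.islower c),
       u || cs.any (fun c => PySem.Chars.isupper c),
       s || cs.any (fun c => pvSpecial.contains c)) := by
  induction cs generalizing d l u s with
  | nil => simp
  | cons c cs ih => rw [List.foldl_cons, ih]; simp [List.any_cons, Bool.or_assoc]

-- ===== VERDICT (by name: the statement is the Claim_ definition above) =====
theorem password_requirements_spec : Claim_equal_password_requirements := by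
  intro password _
  unfold Spec_password_requirements password_requirements password_requirements_alt
  simp only [pvFold4, Bool.false_or]
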